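-- pv_equiv track=rewrite | github.com/byeongjulee222/problems | 백준/1325_효율적인 해킹.py | alphaNumber
-- ===== SOURCE A (Python) =====
-- def alphaNumber(word):
--     alpha = ''
--     num = ''
--     for w in word:
--         if w.isalpha():
--             alpha += w
--         else:
--             num += w
--
--     if len(alpha) == 0 or len(num) == 0: return False
--     elif word[0].isdecimal(): return False
--     elif num[0] == '0': return False
--     elif len(alpha) > 6: return False
--     elif len(num) > 6: return False
--     elif alpha + num != word: return False
--     elif len(alpha) < 3: return False
--     for i in alpha:
--         if i.isupper():
--             return False
--
--     else: return True
-- ===== SOURCE B (Python) =====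
-- def alphaNumber(word):
--     # Split at the end of the leading alphabetic run, then validate each half.
--     i = 0
--     while i < len(word) and word[i].isalpha():
--         i += 1
--     head, tail = word[:i], word[i:]
--     return (3 <= i <= 6
--             and not any(c.isupper() for c in head)
--             and tail != ''
--             and tail[0] != '0'
--             and len(tail) <= 6
--             and not any(c.isalpha() for c in tail))
-- ===== Notes on version B (the rewrite author's own statement) =====
-- stated objective: simpler
-- what changed: B replaces A's two-accumulator partition pass plus the structural reassembly equality check with a single split at the end of the leading alphabetic run (head, tail) and direct validation of each half.
import Mathlib
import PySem

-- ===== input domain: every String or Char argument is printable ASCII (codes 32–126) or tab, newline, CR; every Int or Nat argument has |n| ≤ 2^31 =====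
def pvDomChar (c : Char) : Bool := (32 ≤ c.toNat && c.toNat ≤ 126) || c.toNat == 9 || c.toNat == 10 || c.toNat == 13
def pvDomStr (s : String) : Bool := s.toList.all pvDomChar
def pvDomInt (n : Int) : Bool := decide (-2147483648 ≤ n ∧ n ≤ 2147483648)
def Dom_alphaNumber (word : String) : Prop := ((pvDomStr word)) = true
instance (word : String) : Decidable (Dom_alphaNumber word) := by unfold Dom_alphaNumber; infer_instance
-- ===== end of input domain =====

-- B splits the word once at the end of its leading alphabetic run and validates the two halves
-- directly, instead of A's two-accumulator partition pass plus the 'alpha + num == word'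
-- structural re-check (objective: simpler decomposition, same asymptotic cost).


-- ===== PORT A =====
def alphaNumber (word : String) : Bool :=
  -- for w in word: append w to alpha or to num
  let p := word.toList.foldl
    (fun (p : List Char × List Char) w =>
      if PySem.Chars.isalpha w then (p.1 ++ [w], p.2) else (p.1, p.2 ++ [w]))
    ([], [])
  let alpha := p.1
  let num := p.2
  if alpha.length = 0 || num.length = 0 then false
  -- word[0].isdecimal(): isdecimal coincides with isdigit on the printable-ASCII input domain
  else if (PySem.List.pyGet? word.toList 0).elim false PySem.Chars.isdigit then false
  else if PySem.List.pyGet? num 0 = some '0' then false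
  else if 6 < alpha.length then false
  else if 6 < num.length then false
  else if alpha ++ num ≠ word.toList then false
  else if alpha.length < 3 then false
  else !alpha.any PySem.Chars.isupper

-- ===== PORT B =====
-- the while loop of Source B: number of leading characters satisfying isalpha
def altAlphaRun : List Char → Nat
  | [] => 0
  | c :: cs => if PySem.Chars.isalpha c then altAlphaRun cs + 1 else 0

def alphaNumber_alt (word : String) : Bool :=
  let cs := word.toList
  let i := altAlphaRun cs
  let head := PySem.List.slice cs none (some (i : Int))   -- word[:i]
  let tail := PySem.List.slice cs (some (i : Int)) none   -- word[i:]
  decide (3 ≤ i) && decide (i ≤ 6)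
    && !head.any PySem.Chars.isupper
    && !tail.isEmpty
    && !(PySem.List.pyGet? tail 0 == some '0')
    && decide (tail.length ≤ 6)
    && !tail.any PySem.Chars.isalpha

-- ===== PRECONDITION & SPEC =====
def Spec_alphaNumber (word : String) (out : Bool) : Prop := out = alphaNumber_alt word
instance (word : String) (out : Bool) : Decidable (Spec_alphaNumber word out) := by unfold Spec_alphaNumber; infer_instance

-- ===== CLAIM (what is proved, stated in full; the proofs are below) =====
def Claim_equal_alphaNumber : Prop := ∀ (word : String), Dom_alphaNumber word → Spec_alphaNumber word (alphaNumber word)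

-- ===== LEMMAS AND PROOFS =====

theorem pv_takeWhile_split (p : Char → Bool) (a n : List Char)
    (ha : ∀ c ∈ a, p c = true) (hn : ∀ c ∈ n, p c = false) :
    (a ++ n).takeWhile p = a := by
  induction a with
  | nil => cases n with | nil => simp | cons x xs => simp [hn x (by simp)]
  | cons x xs ih =>
    simp only [List.cons_append, List.takeWhile_cons, ha x (by simp)]
    simp [ih (fun c hc => ha c (by simp [hc]))]
theorem pv_sep (p : Char → Bool) (l : List Char)
    (h : ∀ c ∈ l.dropWhile p, p c = false) :
    l.filter p ++ l.filter (fun c => !p c) = l := by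
  induction l with
  | nil => simp
  | cons c cs ih =>
    by_cases hc : p c
    · simp only [List.dropWhile_cons, hc, if_pos] at h
      simp [hc, ih h]
    · have hall : ∀ x ∈ c :: cs, p x = false := by
        simpa [List.dropWhile_cons, hc] using h
      have h1 : cs.filter p = [] := List.filter_eq_nil_iff.mpr (fun x hx => by
        simpa using hall x (by simp [hx]))
      simp [hc, h1]
      exact fun a haa => hall a (by simp [haa])

-- from a separation equation, identify takeWhile/dropWhile with the filters
theorem pv_ident (p : Char → Bool) (l : List Char)
    (hsep : l.filter p ++ l.filter (fun c => !p c) = l) :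
    l.takeWhile p = l.filter p ∧ l.dropWhile p = l.filter (fun c => !p c) := by
  have ha : ∀ c ∈ l.filter p, p c = true := fun c hc => (List.mem_filter.mp hc).2
  have hn : ∀ c ∈ l.filter (fun c => !p c), p c = false := fun c hc => by
    simpa using (List.mem_filter.mp hc).2
  have ht : l.takeWhile p = l.filter p := by
    conv_lhs => rw [← hsep]
    exact pv_takeWhile_split p _ _ ha hn
  refine ⟨ht, ?_⟩
  have := List.takeWhile_append_dropWhile (p := p) (l := l)
  rw [ht] at this
  have h2 : l.filter p ++ l.dropWhile p = l.filter p ++ l.filter (fun c => !p c) := by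
    rw [this, hsep]
  exact List.append_cancel_left h2

theorem pv_foldl_partition (l a n : List Char) :
    l.foldl (fun (p : List Char × List Char) w =>
        if PySem.Chars.isalpha w then (p.1 ++ [w], p.2) else (p.1, p.2 ++ [w])) (a, n)
      = (a ++ l.filter PySem.Chars.isalpha, n ++ l.filter (fun c => !PySem.Chars.isalpha c)) := by
  induction l generalizing a n with
  | nil => simp
  | cons c cs ih => by_cases h : PySem.Chars.isalpha c <;> simp [h, ih]

theorem pv_altAlphaRun_eq (l : List Char) :
    altAlphaRun l = (l.takeWhile PySem.Chars.isalpha).length := by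
  induction l with
  | nil => rfl
  | cons c cs ih => by_cases h : PySem.Chars.isalpha c <;> simp [altAlphaRun, h, ih]

theorem pv_take_run (p : Char → Bool) (l : List Char) :
    l.take (l.takeWhile p).length = l.takeWhile p := by
  induction l with
  | nil => simp
  | cons c cs ih => by_cases h : p c <;> simp [h, ih]

theorem pv_drop_run (p : Char → Bool) (l : List Char) :
    l.drop (l.takeWhile p).length = l.dropWhile p := by
  induction l with
  | nil => simp
  | cons c cs ih => by_cases h : p c <;> simp [h, ih]

theorem pv_alpha_not_digit (c : Char) (h : PySem.Chars.isalpha c = true) :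
    PySem.Chars.isdigit c = false := by
  simp only [PySem.Chars.isalpha, PySem.Chars.isupper, PySem.Chars.islower, Bool.or_eq_true,
    Bool.and_eq_true, decide_eq_true_eq, Char.le_def] at h
  simp only [PySem.Chars.isdigit, Bool.and_eq_false_iff, decide_eq_false_iff_not, Char.le_def]
  rcases h with ⟨h1, h2⟩ | ⟨h1, h2⟩ <;> simp_all [UInt32.le_iff_toNat_le] <;> omega

theorem pv_alt_eq (word : String) :
    alphaNumber_alt word =
      (let cs := word.toList
       let h := cs.takeWhile PySem.Chars.isalpha
       let t := cs.dropWhile PySem.Chars.isalpha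
       decide (3 ≤ h.length) && decide (h.length ≤ 6)
        && !h.any PySem.Chars.isupper
        && !t.isEmpty
        && !(PySem.List.pyGet? t 0 == some '0')
        && decide (t.length ≤ 6)
        && !t.any PySem.Chars.isalpha) := by
  simp only [alphaNumber_alt, pv_altAlphaRun_eq]
  rw [PySem.List.slice_to _ (Int.natCast_nonneg _), PySem.List.slice_from _ (Int.natCast_nonneg _)]
  simp only [Int.toNat_natCast, pv_take_run, pv_drop_run]

theorem pv_both (a n cs : List Char)
    (ha : ∀ c ∈ a, PySem.Chars.isalpha c = true)
    (hn : ∀ c ∈ n, PySem.Chars.isalpha c = false)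
    (hsep : a ++ n = cs) :
    (if a.length = 0 || n.length = 0 then false
     else if (PySem.List.pyGet? cs 0).elim false PySem.Chars.isdigit then false
     else if PySem.List.pyGet? n 0 = some '0' then false
     else if 6 < a.length then false
     else if 6 < n.length then false
     else if a ++ n ≠ cs then false
     else if a.length < 3 then false
     else !a.any PySem.Chars.isupper)
    = (decide (3 ≤ a.length) && decide (a.length ≤ 6)
        && !a.any PySem.Chars.isupper
        && !n.isEmpty
        && !(PySem.List.pyGet? n 0 == some '0')
        && decide (n.length ≤ 6)
        && !n.any PySem.Chars.isalpha) := by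
  subst hsep
  have hnoa : (!n.any PySem.Chars.isalpha) = true := by
    simp only [Bool.not_eq_eq_eq_not, Bool.not_true, List.any_eq_false]
    exact fun x hx => by simp [hn x hx]
  cases a with
  | nil => simp
  | cons c a' =>
    cases n with
    | nil => simp
    | cons d n' =>
      have hget : PySem.List.pyGet? ((c :: a') ++ (d :: n')) 0 = some c := by
        have h0 : (0:Int) ≤ ↑a'.length + (↑n'.length + 1) := by positivity
        simp [PySem.List.pyGet?, PySem.List.pyIdx?, h0]
      have hdig : PySem.Chars.isdigit c = false :=
        pv_alpha_not_digit c (ha c (by simp))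
      have hget2 : PySem.List.pyGet? (d :: n') 0 = some d := by
        have h0 : (0:Int) ≤ (↑n'.length : Int) := by positivity
        simp [PySem.List.pyGet?, PySem.List.pyIdx?, h0]
      rw [hget, hget2]
      simp only [Option.elim, hdig, hnoa, Bool.and_true]
      split_ifs <;> simp_all <;> omega

theorem pv_main (word : String) : alphaNumber word = alphaNumber_alt word := by
  rw [pv_alt_eq]
  simp only [alphaNumber, pv_foldl_partition, List.nil_append]
  have ha : ∀ c ∈ word.toList.filter PySem.Chars.isalpha, PySem.Chars.isalpha c = true :=
    fun c hc => (List.mem_filter.mp hc).2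
  have hn : ∀ c ∈ word.toList.filter (fun c => !PySem.Chars.isalpha c),
      PySem.Chars.isalpha c = false := fun c hc => by
    simpa using (List.mem_filter.mp hc).2
  by_cases hsep : word.toList.filter PySem.Chars.isalpha
      ++ word.toList.filter (fun c => !PySem.Chars.isalpha c) = word.toList
  · obtain ⟨hT, hD⟩ := pv_ident PySem.Chars.isalpha word.toList hsep
    rw [hT, hD]
    exact pv_both _ _ _ ha hn hsep
  · have hany : (word.toList.dropWhile PySem.Chars.isalpha).any PySem.Chars.isalpha = true := by
      cases h : (word.toList.dropWhile PySem.Chars.isalpha).any PySem.Chars.isalpha with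
      | true => rfl
      | false => exact absurd (pv_sep _ _ (fun c hc => Bool.eq_false_iff.mpr (List.any_eq_false.mp h c hc))) hsep
    simp only [hany, Bool.not_true, Bool.and_false]
    split_ifs <;> rfl

-- ===== VERDICT (by name: the statement is the Claim_ definition above) =====
theorem alphaNumber_spec : Claim_equal_alphaNumber := by
  intro word _
  unfold Spec_alphaNumber
  exact pv_main word
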